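-- pv_equiv track=rewrite | github.com/patwadeepak/data-structures-and-algorithms | codeforces/contests-participated/Codeforces Round 1050 (Div. 4)/D.py | solve
-- ===== SOURCE A (Python) =====
-- import math
--
-- def solve(a, n):
--     is_any_odd = any([x%2 == 1 for x in a])
--     if not is_any_odd:
--         return 0
--
--     odds = []
--     score = 0
--     for num in a:
--         if num % 2 == 0:
--             score += num
--         else:
--             odds.append(num)
--
--     odds.sort()
--
--     largest_odd = odds.pop()
--     score += largest_odd
--
--     if len(odds)%2 == 0:
--         score += sum(odds[len(odds)//2:])
--     else:
--         start = int(math.ceil(len(odds)/2))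
--         score += sum(odds[start:])
--     return score
-- ===== SOURCE B (Python) =====
-- def solve(a, n):
--     # Score = sum of evens + sum of the largest ceil(m/2) odd values (m = #odds),
--     # computed by quickselect-style recursion (no full sort).
--     odds = [x for x in a if x % 2]
--     if not odds:
--         return 0
--     evens = sum(x for x in a if x % 2 == 0)
--     return evens + _sum_topk(odds, (len(odds) + 1) // 2)
--
--
-- def _sum_topk(xs, k):
--     # sum of the k largest elements of xs (0 <= k <= len(xs))
--     if k == 0:
--         return 0
--     p = xs[len(xs) // 2]
--     greater = [x for x in xs if x > p]
--     equal_count = sum(1 for x in xs if x == p)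
--     g = len(greater)
--     if k <= g:
--         return _sum_topk(greater, k)
--     if k <= g + equal_count:
--         return sum(greater) + (k - g) * p
--     less = [x for x in xs if x < p]
--     return sum(greater) + equal_count * p + _sum_topk(less, k - g - equal_count)
-- ===== Notes on version B (the rewrite author's own statement) =====
-- stated objective: alternative
-- what changed: B replaces A's partition-loop + full sort + pop + parity-branched slice by a single characterization (even sum + sum of the largest ceil(m/2) odd values) computed with a quickselect-style three-way-partition recursion, so no full sort is performed.
import Mathlib
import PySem

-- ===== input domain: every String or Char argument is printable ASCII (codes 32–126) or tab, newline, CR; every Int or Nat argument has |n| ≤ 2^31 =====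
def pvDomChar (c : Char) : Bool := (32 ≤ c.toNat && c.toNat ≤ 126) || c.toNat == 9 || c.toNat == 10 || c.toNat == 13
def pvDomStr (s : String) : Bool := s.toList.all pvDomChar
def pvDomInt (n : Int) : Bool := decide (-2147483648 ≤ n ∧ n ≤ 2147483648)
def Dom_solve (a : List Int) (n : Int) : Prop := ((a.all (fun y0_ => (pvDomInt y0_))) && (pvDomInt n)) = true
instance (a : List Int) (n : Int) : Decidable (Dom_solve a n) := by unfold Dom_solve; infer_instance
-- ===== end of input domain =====

-- B replaces A's full sort of the odd values by a quickselect-style three-way-partition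
-- recursion that sums the top ⌈m/2⌉ odds directly (plus the even sum): a different algorithm
-- of comparable measured cost.


-- ===== PORT A =====
def solve (a : List Int) (n : Int) : Int :=
  let is_any_odd := (a.map (fun x => PySem.Int.mod x 2 == 1)).any (fun b => b)
  if !is_any_odd then 0
  else
    -- the for-loop accumulating (score, odds)
    let st := a.foldl (fun (acc : Int × List Int) num =>
      if PySem.Int.mod num 2 == 0 then (acc.1 + num, acc.2) else (acc.1, acc.2 ++ [num])) (0, [])
    let odds := PySem.List.sorted st.2 (fun x => x)
    match PySem.List.pop? odds with
    | none => 0  -- unreachable: the any-guard ensures odds ≠ [] (Python would raise IndexError)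
    | some (largest_odd, odds') =>
      let score := st.1 + largest_odd
      if PySem.Int.mod ((odds'.length : Int)) 2 == 0 then
        score + (PySem.List.slice odds' (some (PySem.Int.floordiv ((odds'.length : Int)) 2)) none).sum
      else
        -- int(math.ceil(k/2)) ported as (k+1)//2: exact for 0 ≤ k < 2^52, hence on all list lengths
        let start := PySem.Int.floordiv ((odds'.length : Int) + 1) 2
        score + (PySem.List.slice odds' (some start) none).sum

-- ===== PORT B =====
-- sum of the k largest elements of xs (Source B's _sum_topk, quickselect-style)
def sumTopk (xs : List Int) (k : Int) : Int :=
  if k = 0 then 0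
  else if hxs : xs = [] then 0
    -- xs = []: Python raises IndexError at xs[len(xs)//2]; unreachable under Source B's invariant 0 < k ≤ len(xs)
  else
    let p := xs.getD (xs.length / 2) 0  -- xs[len(xs)//2]; the index is in range since xs ≠ []
    let greater := xs.filter (fun x => p < x)
      let equal_count : Int := (xs.countP (fun x => x == p) : Int)
      let g : Int := (greater.length : Int)
      if k ≤ g then sumTopk greater k
      else if k ≤ g + equal_count then greater.sum + (k - g) * p
      else
        let less := xs.filter (fun x => x < p)
        greater.sum + equal_count * p + sumTopk less (k - g - equal_count)
termination_by xs.length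
decreasing_by
  all_goals
    have hpm : xs.getD (xs.length / 2) 0 ∈ xs := by
      rw [List.getD_eq_getElem xs 0 (Nat.div_lt_self (List.length_pos_of_ne_nil hxs) one_lt_two)]
      exact List.getElem_mem _
    refine lt_of_eq_of_lt List.length_unattach (lt_of_lt_of_eq ?_ (List.length_attach (l := xs)))
    apply List.length_filter_lt_length_iff_exists.mpr
    exact ⟨⟨_, hpm⟩, List.mem_attach _ _, by simp⟩

def solve_alt (a : List Int) (n : Int) : Int :=
  let odds := a.filter (fun x => PySem.Int.mod x 2 != 0)
  if odds = [] then 0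
  else
    let evens := (a.filter (fun x => PySem.Int.mod x 2 == 0)).sum
    evens + sumTopk odds (PySem.Int.floordiv ((odds.length : Int) + 1) 2)

-- ===== PRECONDITION & SPEC =====
def Spec_solve (a : List Int) (n : Int) (out : Int) : Prop := out = solve_alt a n
instance (a : List Int) (n : Int) (out : Int) : Decidable (Spec_solve a n out) := by unfold Spec_solve; infer_instance

-- ===== CLAIM (what is proved, stated in full; the proofs are below) =====
def Claim_equal_solve : Prop := ∀ (a : List Int) (n : Int), Dom_solve a n → Spec_solve a n (solve a n)

-- ===== LEMMAS AND PROOFS =====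

-- the three parity tests occurring in the two programs agree pointwise
lemma pv_odd_eq (x : Int) :
    ((PySem.Int.mod x 2 != 0) = (PySem.Int.mod x 2 == 1)) ∧
    ((!(PySem.Int.mod x 2 == 0)) = (PySem.Int.mod x 2 == 1)) := by
  rcases PySem.Int.mod_two_eq x with h | h <;> rw [h] <;> exact ⟨rfl, rfl⟩

-- A's accumulator loop, split into its two components
lemma pv_loop_eq (a : List Int) :
    a.foldl (fun (acc : Int × List Int) num =>
      if PySem.Int.mod num 2 == 0 then (acc.1 + num, acc.2) else (acc.1, acc.2 ++ [num])) (0, []) =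
    ((a.filter (fun x => PySem.Int.mod x 2 == 0)).sum,
      a.filter (fun x => PySem.Int.mod x 2 == 1)) := by
  have hfun : (fun (acc : Int × List Int) num =>
      if PySem.Int.mod num 2 == 0 then (acc.1 + num, acc.2) else (acc.1, acc.2 ++ [num])) =
      (fun (acc : Int × List Int) num =>
        ((fun (s : Int) x => if PySem.Int.mod x 2 == 0 then s + x else s) acc.1 num,
         (fun (l : List Int) x => if (PySem.Int.mod x 2 == 1) = true then l ++ [x] else l) acc.2 num)) := by
    funext acc num
    rcases PySem.Int.mod_two_eq num with h | h <;> simp only [h] <;> rfl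
  rw [hfun, PySem.List.foldl_prod_mk
    (fun (s : Int) x => if PySem.Int.mod x 2 == 0 then s + x else s)
    (fun (l : List Int) x => if (PySem.Int.mod x 2 == 1) = true then l ++ [x] else l) a 0 []]
  have h1 : ∀ (l : List Int) (s : Int),
      l.foldl (fun (s : Int) x => if PySem.Int.mod x 2 == 0 then s + x else s) s =
        s + (l.filter (fun x => PySem.Int.mod x 2 == 0)).sum := by
    intro l
    induction l with
    | nil => intro s; simp
    | cons x t ih =>
      intro s
      by_cases h : (PySem.Int.mod x 2 == 0) = true <;>
        simp only [List.foldl_cons, List.filter_cons, h, Bool.false_eq_true,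
          ite_true, ite_false, List.sum_cons, ih] <;> ring
  have h2 := PySem.List.foldl_append_if (fun x : Int => PySem.Int.mod x 2 == 1) (fun x => x) a
    ([] : List Int)
  simp only [Prod.mk.injEq]
  exact ⟨by rw [h1]; ring, by rw [h2]; simp [List.map_id']⟩

-- three-way partition of a list at a pivot, as a permutation
lemma pv_threeway_perm (xs : List Int) (p : Int) :
    ((xs.filter (fun x => x < p) ++ xs.filter (fun x => x == p)) ++
      xs.filter (fun x => p < x)).Perm xs := by
  induction xs with
  | nil => simp
  | cons x t ih =>
    rcases lt_trichotomy x p with h | h | h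
    · simpa [List.filter_cons, h, not_lt.mpr h.le, ne_of_lt h, (by omega : ¬ p < x)] using ih.cons x
    · subst h
      simp only [List.filter_cons, lt_irrefl, decide_false, Bool.false_eq_true,
        beq_self_eq_true, if_pos, ite_false]
      refine List.Perm.trans ?_ (ih.cons x)
      exact (List.perm_middle.append_right _).trans (by simp [List.append_assoc])
    · simpa [List.filter_cons, h, not_lt.mpr h.le, (ne_of_lt h).symm, (by omega : ¬ x < p)] using
        (List.perm_middle.trans (ih.cons x))

-- sorted(xs) decomposes at any pivot p
lemma pv_sorted_threeway (xs : List Int) (p : Int) :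
    PySem.List.sorted xs (fun x => x) =
      PySem.List.sorted (xs.filter (fun x => x < p)) (fun x => x)
        ++ List.replicate (xs.countP (fun x => x == p)) p
        ++ PySem.List.sorted (xs.filter (fun x => p < x)) (fun x => x) := by
  have hE : xs.filter (fun x => x == p) = List.replicate (xs.countP (fun x => x == p)) p := by
    rw [List.eq_replicate_iff]
    refine ⟨List.countP_eq_length_filter.symm, fun b hb => ?_⟩
    have := (List.mem_filter.mp hb).2
    simpa using this
  apply PySem.List.sorted_id_eq_of_perm_of_pairwise
  · -- the decomposition is a permutation of xs
    refine List.Perm.trans ?_ (pv_threeway_perm xs p)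
    have hEp : (List.replicate (xs.countP (fun x => x == p)) p).Perm
        (xs.filter (fun x => x == p)) := by rw [hE]
    exact ((PySem.List.sorted_perm _ _ _).append hEp).append (PySem.List.sorted_perm _ _ _)
  · -- and it is ≤-ordered
    have hL : ∀ x ∈ PySem.List.sorted (xs.filter (fun x => x < p)) (fun x => x), x < p := by
      intro x hx
      have := (List.mem_filter.mp ((PySem.List.mem_sorted _ _ _ _).mp hx)).2
      simpa using this
    have hG : ∀ x ∈ PySem.List.sorted (xs.filter (fun x => p < x)) (fun x => x), p < x := by
      intro x hx
      have := (List.mem_filter.mp ((PySem.List.mem_sorted _ _ _ _).mp hx)).2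
      simpa using this
    rw [List.pairwise_append]
    refine ⟨?_, PySem.List.sorted_pairwise _ _, ?_⟩
    · rw [List.pairwise_append]
      refine ⟨PySem.List.sorted_pairwise _ _,
        List.pairwise_replicate.mpr (Or.inr le_rfl), ?_⟩
      intro x hx y hy
      have hyp : y = p := List.eq_of_mem_replicate hy
      exact hyp ▸ (hL x hx).le
    · intro x hx y hy
      rcases List.mem_append.mp hx with hx | hx
      · exact ((hL x hx).trans (hG y hy)).le
      · have hxp : x = p := List.eq_of_mem_replicate hx
        exact hxp ▸ (hG y hy).le

-- the quickselect sum is the sum of the top-k tail of the sorted list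
lemma pv_sum_drop_append3 (A B C : List Int) (i : Nat) :
    ((A ++ (B ++ C)).drop i).sum =
      (A.drop i).sum + (B.drop (i - A.length)).sum + (C.drop (i - A.length - B.length)).sum := by
  rw [List.drop_append, List.drop_append]
  simp [Nat.sub_sub, add_assoc]

lemma pv_sumTopk_eq (N : Nat) : ∀ (xs : List Int) (k : Int), xs.length ≤ N → 0 ≤ k →
    k ≤ (xs.length : Int) →
    sumTopk xs k = ((PySem.List.sorted xs (fun x => x)).drop (xs.length - k.toNat)).sum := by
  induction N with
  | zero =>
    intro xs k hN h0 hk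
    have hx : xs = [] := List.eq_nil_of_length_eq_zero (Nat.le_zero.mp hN)
    subst hx
    have hk0 : k = 0 := by simp at hk; omega
    subst hk0
    rw [sumTopk]
    simp [show PySem.List.sorted ([] : List Int) (fun x => x) = [] from rfl]
  | succ N ih =>
    intro xs k hN h0 hk
    by_cases hk0 : k = 0
    · subst hk0
      rw [sumTopk]
      simp [List.drop_eq_nil_of_le (le_of_eq (PySem.List.length_sorted xs (fun x => x) false))]
    have hxs : xs ≠ [] := by
      intro hx; subst hx; simp at hk; omega
    rw [sumTopk, if_neg hk0, dif_neg hxs]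
    have hlen : 0 < xs.length := List.length_pos_of_ne_nil hxs
    have hidx : xs.length / 2 < xs.length := Nat.div_lt_self hlen one_lt_two
    have hpd : xs.getD (xs.length / 2) 0 = xs[xs.length / 2] := List.getD_eq_getElem xs 0 hidx
    dsimp only
    rw [hpd]
    set p := xs[xs.length / 2] with hpdef
    have hpmem : p ∈ xs := List.getElem_mem _
    set L := xs.filter (fun x => x < p) with hLdef
    set G := xs.filter (fun x => p < x) with hGdef
    set e := xs.countP (fun x => x == p) with hedef
    have hsplit : L.length + e + G.length = xs.length := by
      have hce : (xs.filter (fun x => x == p)).length = e := List.countP_eq_length_filter.symm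
      have hlsum := (pv_threeway_perm xs p).length_eq
      simp only [List.length_append] at hlsum
      rw [← hLdef, ← hGdef, hce] at hlsum
      omega
    have he : 0 < e := List.countP_pos_iff.mpr ⟨p, hpmem, by simp⟩
    have hdec := pv_sorted_threeway xs p
    rw [List.append_assoc, ← hLdef, ← hGdef, ← hedef] at hdec
    have hsl : (PySem.List.sorted L (fun x => x)).length = L.length :=
      PySem.List.length_sorted _ _ _
    have hkn : k.toNat ≤ xs.length := by omega
    rw [hdec, pv_sum_drop_append3]
    split_ifs with h1 h2
    · -- k ≤ |G| : recurse on G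
      have hk1 : k.toNat ≤ G.length := by omega
      rw [List.drop_eq_nil_of_le (by rw [hsl]; omega),
        List.drop_eq_nil_of_le (by simp only [List.length_replicate]; rw [hsl]; omega)]
      have hC : xs.length - k.toNat - (PySem.List.sorted L (fun x => x)).length -
          (List.replicate e p).length = G.length - k.toNat := by
        simp only [List.length_replicate]; rw [hsl]; omega
      rw [hC, ih G k (by omega) h0 (by exact_mod_cast h1)]
      simp
    · -- |G| < k ≤ |G| + e : the pivot block supplies the remaining k - |G| values
      have hgk : G.length < k.toNat := by omega
      have hke : k.toNat ≤ G.length + e := by omega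
      rw [List.drop_eq_nil_of_le (by rw [hsl]; omega)]
      have hB : xs.length - k.toNat - (PySem.List.sorted L (fun x => x)).length =
          e - (k.toNat - G.length) := by rw [hsl]; omega
      have hC : e - (k.toNat - G.length) - (List.replicate e p).length = 0 := by
        simp only [List.length_replicate]; omega
      rw [hB, hC, List.drop_replicate, List.drop_zero, List.sum_replicate,
        (PySem.List.sorted_perm G (fun x => x) false).sum_eq]
      have hcast : ((e - (e - (k.toNat - G.length)) : Nat) : Int) = k - (G.length : Int) := by
        omega
      rw [nsmul_eq_mul, hcast]
      simp only [List.sum_nil]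
      ring
    · -- k > |G| + e : recurse on L
      have hgek : G.length + e < k.toNat := by
        have : ¬ k ≤ (G.length : Int) + (e : Int) := h2
        omega
      have hA : xs.length - k.toNat = L.length - (k - (G.length : Int) - (e : Int)).toNat := by
        omega
      have hB : xs.length - k.toNat - (PySem.List.sorted L (fun x => x)).length = 0 := by
        rw [hsl]; omega
      rw [hB, Nat.zero_sub, hA, ih L (k - (G.length : Int) - (e : Int)) (by omega) (by omega) (by omega),
        List.drop_zero, List.drop_zero, List.sum_replicate,
        (PySem.List.sorted_perm G (fun x => x) false).sum_eq, nsmul_eq_mul]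
      ring

-- A's value, when some odd exists, is even-sum + sum of the top half of the sorted odds
lemma pv_solve_eq (a : List Int) (n : Int)
    (h : a.filter (fun x => PySem.Int.mod x 2 == 1) ≠ []) :
    solve a n = (a.filter (fun x => PySem.Int.mod x 2 == 0)).sum +
      ((PySem.List.sorted (a.filter (fun x => PySem.Int.mod x 2 == 1)) (fun x => x)).drop
        ((a.filter (fun x => PySem.Int.mod x 2 == 1)).length / 2)).sum := by
  unfold solve
  have hany : ((a.map (fun x => PySem.Int.mod x 2 == 1)).any (fun b => b)) = true := by
    rw [List.any_map]
    rw [List.any_eq_true]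
    rcases List.exists_mem_of_ne_nil _ h with ⟨x, hx⟩
    exact ⟨x, (List.mem_filter.mp hx).1, (List.mem_filter.mp hx).2⟩
  rw [hany]
  rw [if_neg (by simp : ¬ ((!true) = true))]
  dsimp only
  rw [pv_loop_eq]
  set E := (a.filter (fun x => PySem.Int.mod x 2 == 0)).sum with hEdef
  set odds := PySem.List.sorted (a.filter (fun x => PySem.Int.mod x 2 == 1)) (fun x => x)
    with hodef
  set m := (a.filter (fun x => PySem.Int.mod x 2 == 1)).length with hmdef
  have hmlen : odds.length = m := PySem.List.length_sorted _ _ _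
  have hm1 : 0 < m := List.length_pos_of_ne_nil h
  have hone : odds ≠ [] := by
    rw [Ne, PySem.List.sorted_eq_nil_iff]; exact h
  have hpop : PySem.List.pop? odds = some (odds.getLast hone, odds.dropLast) := by
    conv_lhs => rw [← List.dropLast_append_getLast hone]
    exact PySem.List.pop?_last _ _
  rw [hpop]
  have hkd : odds.dropLast.length = m - 1 := by
    rw [List.length_dropLast, hmlen]
  have hdropsum : ∀ d : Nat, d ≤ m - 1 →
      (odds.dropLast.drop d).sum + odds.getLast hone = (odds.drop d).sum := by
    intro d hd
    conv_rhs => rw [← List.dropLast_append_getLast hone]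
    have hz : d - odds.dropLast.length = 0 := by omega
    rw [List.drop_append, hz]
    simp
  dsimp only
  rw [hkd]
  have hcond : PySem.Int.mod ((m - 1 : Nat) : Int) 2 = (((m - 1) % 2 : Nat) : Int) := by
    exact_mod_cast PySem.Int.mod_natCast (m - 1) 2
  rw [hcond]
  split_ifs with hpar
  · -- len(odds) even after the pop
    have hpar' : (m - 1) % 2 = 0 := by
      simp only [beq_iff_eq, Nat.cast_eq_zero] at hpar
      exact hpar
    have hdiv : PySem.Int.floordiv ((m - 1 : Nat) : Int) 2 = (((m - 1) / 2 : Nat) : Int) := by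
      exact_mod_cast PySem.Int.floordiv_natCast (m - 1) 2
    rw [hdiv, PySem.List.slice_from _ (Int.natCast_nonneg _), Int.toNat_natCast]
    have hd : (m - 1) / 2 = m / 2 := by omega
    rw [hd, ← hdropsum (m / 2) (by omega)]
    ring
  · -- len(odds) odd after the pop: start = ceil((m-1)/2) = m/2
    have hpar' : (m - 1) % 2 = 1 := by
      simp only [beq_iff_eq, Nat.cast_eq_zero] at hpar
      omega
    have hcast : ((m - 1 : Nat) : Int) + 1 = ((m : Nat) : Int) := by omega
    have hdiv : PySem.Int.floordiv (((m - 1 : Nat) : Int) + 1) 2 = ((m / 2 : Nat) : Int) := by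
      rw [hcast]
      exact_mod_cast PySem.Int.floordiv_natCast m 2
    rw [hdiv, PySem.List.slice_from _ (Int.natCast_nonneg _), Int.toNat_natCast]
    have hd : m / 2 ≤ m - 1 := by omega
    rw [← hdropsum (m / 2) hd]
    ring

-- ===== VERDICT (by name: the statement is the Claim_ definition above) =====
theorem solve_spec : Claim_equal_solve := by
  unfold Claim_equal_solve
  intro a n _
  unfold Spec_solve
  have hfeq : a.filter (fun x => PySem.Int.mod x 2 != 0) =
      a.filter (fun x => PySem.Int.mod x 2 == 1) :=
    List.filter_congr (fun x _ => (pv_odd_eq x).1)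
  by_cases h : a.filter (fun x => PySem.Int.mod x 2 == 1) = []
  · -- no odd number: both sides return 0
    unfold solve solve_alt
    rw [hfeq, if_pos h]
    have hany : ((a.map (fun x => PySem.Int.mod x 2 == 1)).any (fun b => b)) = false := by
      rw [List.any_map, List.any_eq_false]
      intro x hx hodd
      simp only [Function.comp] at hodd
      have hmem : x ∈ a.filter (fun x => PySem.Int.mod x 2 == 1) :=
        List.mem_filter.mpr ⟨hx, hodd⟩
      rw [h] at hmem
      exact absurd hmem (List.not_mem_nil)
    rw [hany]
    rfl
  · rw [pv_solve_eq a n h]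
    unfold solve_alt
    rw [hfeq, if_neg h]
    set m := (a.filter (fun x => PySem.Int.mod x 2 == 1)).length with hmdef
    have hm1 : 0 < m := List.length_pos_of_ne_nil h
    have hcast : ((m : Nat) : Int) + 1 = (((m + 1 : Nat)) : Int) := by omega
    have hdiv : PySem.Int.floordiv (((m : Nat) : Int) + 1) 2 = (((m + 1) / 2 : Nat) : Int) := by
      rw [hcast]
      exact_mod_cast PySem.Int.floordiv_natCast (m + 1) 2
    rw [hdiv, pv_sumTopk_eq m _ _ le_rfl (Int.natCast_nonneg _) (by exact_mod_cast (by omega : (m + 1) / 2 ≤ m)),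
      Int.toNat_natCast]
    have hd : m - (m + 1) / 2 = m / 2 := by omega
    rw [hd]
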